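-- pv_equiv track=rewrite | github.com/kimhn0605/Programmers | Lv3/숫자 게임.py | solution
-- ===== SOURCE A (Python) =====
-- def solution(A, B):
--     a_i, b_i = -1, -1     # 시간 효율성 => remove 대신 포인터 사용
--     answer = 0
--
--     A.sort()        # 배열 A 오름차순
--     B.sort()        # 배열 B 오름차순
--
--     while (len(A) > 0) :
--         if abs(a_i) == len(A) + 1 :     # 남아있는 A 원소가 없어서 a_i 가 범위를 벗어나면
--             return answer               # answer 리턴
--
--         # 끝에서부터 (큰 수부터) A 원소와 B 원소를 하나씩 비교해나가는데
--         if A[a_i] >= B[b_i] :           # a 가 더 크다면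
--             a_i -= 1                    # a_i - 1
--             B.remove(B[0])              # a 보다 큰 수가 B 에 없다는 의미니까 버린다는 의미로 B 에서 가장 작은 수와 배치
--         else :                          # b 가 더 크다면
--             a_i -= 1                    # 해당 a 와 b 를 배치시켜주고 a_i, b_i 모두 - 1
--             b_i -= 1
--             answer += 1                 # b 가 더 큰 경우니까 answer += 1
-- ===== SOURCE B (Python) =====
-- def solution(A, B):
--     # Descending two-pointer greedy on sorted copies: one index into B,
--     # no list mutation, no negative-index bookkeeping.
--     As = sorted(A)
--     Bs = sorted(B)
--     j = len(Bs) - 1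
--     answer = 0
--     for x in reversed(As):
--         if j >= 0 and x < Bs[j]:
--             answer += 1
--             j -= 1
--     return answer
-- ===== Notes on version B (the rewrite author's own statement) =====
-- stated objective: alternative
-- what changed: Replaces A's while-loop that mutates B with B.remove(B[0]) on each discard step and tracks negative indices with an abs-based stop test by a single for-loop over sorted(A) in reverse with one integer index into sorted(B) and no list mutation (A sorts its arguments in place, B does not mutate them).
-- outside the precondition, e.g. on solution([], [1, 2]): A returns None, B returns 0
import Mathlib
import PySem

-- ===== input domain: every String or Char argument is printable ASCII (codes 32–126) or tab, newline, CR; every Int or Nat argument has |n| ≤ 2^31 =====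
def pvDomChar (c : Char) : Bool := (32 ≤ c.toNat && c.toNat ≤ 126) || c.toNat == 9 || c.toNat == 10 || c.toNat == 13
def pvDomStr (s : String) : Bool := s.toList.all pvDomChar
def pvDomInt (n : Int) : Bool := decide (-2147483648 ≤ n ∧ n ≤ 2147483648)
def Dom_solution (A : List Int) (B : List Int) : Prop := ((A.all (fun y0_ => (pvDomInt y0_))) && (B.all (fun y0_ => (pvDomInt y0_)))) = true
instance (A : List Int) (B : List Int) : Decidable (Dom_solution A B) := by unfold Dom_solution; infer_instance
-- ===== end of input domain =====

-- B replaces A's mutating while-loop (B.remove each discard, negative-index bookkeeping)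
-- by a single reverse scan of sorted(A) with one integer index into sorted(B); equivalence
-- is about the RETURN value only: A sorts its arguments in place, B does not mutate them.

-- ===== PORT A =====
-- Literal port of A's while-loop. State: fuel (the loop runs at most len(A)+1 checks,
-- decrementing |a_i| each pass), a_i/b_i the negative pointers, Bc the shrinking list B,
-- ans the answer. `none` = the Python raises (IndexError) or falls off the loop returning None.
def pyALoop (sA : List Int) : Nat → Int → Int → List Int → Int → Option Int
  | 0, _, _, _, _ => none
  | Nat.succ f, a_i, b_i, Bc, ans =>
    if 0 < sA.length then
      if a_i.natAbs = sA.length + 1 then some ans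
      else
        match PySem.List.pyGet? sA a_i with
        | none => none
        | some av =>
          match PySem.List.pyGet? Bc b_i with
          | none => none
          | some bv =>
            if bv ≤ av then
              match PySem.List.pyGet? Bc 0 with
              | none => none
              | some b0 =>
                match PySem.List.remove? Bc b0 with
                | none => none
                | some Bc' => pyALoop sA f (a_i - 1) b_i Bc' ans
            else pyALoop sA f (a_i - 1) (b_i - 1) Bc (ans + 1)
    else none

def solution (A : List Int) (B : List Int) : Int :=
  let sA := PySem.List.sorted A (fun x => x) false
  let sB := PySem.List.sorted B (fun x => x) false
  (pyALoop sA (sA.length + 1) (-1) (-1) sB 0).getD 0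

-- ===== PORT B =====
def bStep (sB : List Int) (st : Int × Int) (x : Int) : Int × Int :=
  if 0 ≤ st.1 ∧ x < PySem.List.pyGetD sB st.1 0 then (st.1 - 1, st.2 + 1) else st

def solution_alt (A : List Int) (B : List Int) : Int :=
  let sA := PySem.List.sorted A (fun x => x) false
  let sB := PySem.List.sorted B (fun x => x) false
  (sA.reverse.foldl (bStep sB) ((sB.length : Int) - 1, 0)).2

-- ===== PRECONDITION & SPEC =====
-- Pre_ excludes A = [] (Python A falls off its loop and returns None, not an int) and
-- len(B) < len(A) (Python A raises IndexError: its negative index into the shrinking B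
-- runs out of range). On everything else A returns normally.
def Pre_solution (A : List Int) (B : List Int) : Prop := A ≠ [] ∧ A.length ≤ B.length
instance (A : List Int) (B : List Int) : Decidable (Pre_solution A B) := by unfold Pre_solution; infer_instance
def pvWitness_solution : List Int × List Int := ([3, 1, 5, 7], [2, 2, 6, 8])

def Spec_solution (A : List Int) (B : List Int) (out : Int) : Prop := out = solution_alt A B
instance (A : List Int) (B : List Int) (out : Int) : Decidable (Spec_solution A B out) := by unfold Spec_solution; infer_instance

-- ===== CLAIM (what is proved, stated in full; the proofs are below) =====
def Claim_equal_solution : Prop := ∀ (A : List Int) (B : List Int), Dom_solution A B → Pre_solution A B → Spec_solution A B (solution A B)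

-- ===== LEMMAS AND PROOFS =====

-- one-pass reduction lemmas for A's loop (fuel must be a variable so simp unfolds once)
lemma pyALoop_ret (sA : List Int) (f : Nat) (a_i b_i : Int) (Bc : List Int) (ans : Int)
    (h0 : 0 < sA.length) (h1 : a_i.natAbs = sA.length + 1) :
    pyALoop sA (f + 1) a_i b_i Bc ans = some ans := by
  simp only [pyALoop, if_pos h0, if_pos h1]

lemma pyALoop_discard (sA : List Int) (f : Nat) (a_i b_i : Int) (Bc : List Int) (ans : Int)
    (av bv b0 : Int) (Bc' : List Int)
    (h0 : 0 < sA.length) (h1 : a_i.natAbs ≠ sA.length + 1)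
    (hA : PySem.List.pyGet? sA a_i = some av)
    (hB : PySem.List.pyGet? Bc b_i = some bv)
    (hcmp : bv ≤ av)
    (h0B : PySem.List.pyGet? Bc 0 = some b0)
    (hrm : PySem.List.remove? Bc b0 = some Bc') :
    pyALoop sA (f + 1) a_i b_i Bc ans = pyALoop sA f (a_i - 1) b_i Bc' ans := by
  simp only [pyALoop, if_pos h0, if_neg h1, hA, hB, if_pos hcmp, h0B, hrm]

lemma pyALoop_matched (sA : List Int) (f : Nat) (a_i b_i : Int) (Bc : List Int) (ans : Int)
    (av bv : Int)
    (h0 : 0 < sA.length) (h1 : a_i.natAbs ≠ sA.length + 1)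
    (hA : PySem.List.pyGet? sA a_i = some av)
    (hB : PySem.List.pyGet? Bc b_i = some bv)
    (hcmp : ¬ bv ≤ av) :
    pyALoop sA (f + 1) a_i b_i Bc ans = pyALoop sA f (a_i - 1) (b_i - 1) Bc (ans + 1) := by
  simp only [pyALoop, if_pos h0, if_neg h1, hA, hB, if_neg hcmp]

-- Invariant of A's loop after c matches and d discards (k = c + d passes done):
-- a_i = -(c+d)-1, b_i = -c-1, Bc = sB.drop d, ans = c, fuel = |R|+1 where
-- R = sA.reverse.drop (c+d) is the list of A-elements still to process, top first.
-- B's fold over this same R from state (|sB|-1-c, c) produces the same answer.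
lemma pyALoop_eq_fold (sA sB : List Int) (hn : 0 < sA.length)
    (hm : sA.length ≤ sB.length) :
    ∀ (R : List Int) (c d : Nat),
      c + d + R.length = sA.length →
      sA.reverse.drop (c + d) = R →
      pyALoop sA (R.length + 1) (-(c : Int) - (d : Int) - 1) (-(c : Int) - 1)
          (sB.drop d) (c : Int)
        = some ((R.foldl (bStep sB) ((sB.length : Int) - 1 - (c : Int), (c : Int))).2) := by
  intro R
  induction R with
  | nil =>
    intro c d hlen _
    simp only [List.length_nil, Nat.add_zero] at hlen
    rw [show ([] : List Int).length + 1 = 0 + 1 by simp,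
        pyALoop_ret _ _ _ _ _ _ hn (by omega)]
    rfl
  | cons x R' ih =>
    intro c d hlen hR
    set n := sA.length with hn'
    set m := sB.length with hm'
    have hk : c + d < n := by simp at hlen; omega
    have hcm : c + 1 ≤ m := by simp at hlen; omega
    have hdm : d < m := by simp at hlen; omega
    -- the element of sA examined this pass is x
    have hgetA : PySem.List.pyGet? sA (-(c : Int) - (d : Int) - 1) = some x := by
      have h1 : (-(c : Int) - (d : Int) - 1) = -(((c + d + 1 : Nat) : Int)) := by push_cast; ring
      rw [h1, PySem.List.pyGet?_neg_natCast _ _ (by omega) (by omega)]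
      have h2 : sA.reverse[c + d]? = some x := by
        rw [show c + d = c + d + 0 by omega, ← List.getElem?_drop, hR]
        rfl
      rw [List.getElem?_reverse (by omega)] at h2
      rw [← h2]; congr 1; omega
    -- the element of B examined this pass is sB[m-1-c]
    have hmem : m - 1 - c < m := by omega
    have hgetB : PySem.List.pyGet? (sB.drop d) (-(c : Int) - 1)
        = some (sB[m - 1 - c]'(hmem)) := by
      have h1 : (-(c : Int) - 1) = -(((c + 1 : Nat) : Int)) := by push_cast; ring
      rw [h1, PySem.List.pyGet?_neg_natCast _ _ (by omega)
            (by simp only [List.length_drop]; omega)]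
      rw [List.getElem?_drop]
      rw [show d + ((sB.drop d).length - (c + 1)) = m - 1 - c by
            simp only [List.length_drop, ← hm']; omega]
      exact List.getElem?_eq_getElem hmem
    -- B-side lookup agrees
    have hgetD : PySem.List.pyGetD sB ((m : Int) - 1 - (c : Int)) 0 = sB[m - 1 - c]'(hmem) := by
      have h1 : ((m : Int) - 1 - (c : Int)) = ((m - 1 - c : Nat) : Int) := by omega
      rw [h1, PySem.List.pyGetD_natCast]
      simp [List.getD, List.getElem?_eq_getElem hmem]
    have hR' : sA.reverse.drop (c + d + 1) = R' := by
      rw [← List.tail_drop, hR]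
      rfl
    have habs : (-(c : Int) - (d : Int) - 1).natAbs ≠ sA.length + 1 := by omega
    rw [show (x :: R').length + 1 = (R'.length + 1) + 1 by simp]
    by_cases hcmp : sB[m - 1 - c]'(hmem) ≤ x
    · -- A discards the head of Bc; B leaves its state unchanged
      have hdrop : sB.drop d = sB[d]'(by omega) :: sB.drop (d + 1) :=
        List.drop_eq_getElem_cons (by omega)
      rw [pyALoop_discard _ _ _ _ _ _ _ _ _ (sB.drop (d + 1)) hn habs hgetA hgetB hcmp
            (by rw [hdrop]; exact PySem.List.pyGet?_zero_cons _ _)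
            (by rw [hdrop]; exact PySem.List.remove?_cons_self _ _)]
      rw [show -(c : Int) - (d : Int) - 1 - 1 = -(c : Int) - ((d + 1 : Nat) : Int) - 1 by
            push_cast; ring]
      rw [ih c (d + 1) (by simp only [List.length_cons] at hlen; omega)
            (by rw [show c + (d + 1) = c + d + 1 from by omega]; exact hR')]
      have hinit : bStep sB ((m : Int) - 1 - (c : Int), (c : Int)) x
          = ((m : Int) - 1 - (c : Int), (c : Int)) := by
        unfold bStep
        rw [if_neg]
        intro h
        rw [hgetD] at h
        exact absurd h.2 (by omega)
      rw [List.foldl_cons, hinit]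
    · -- a match: A counts it; B counts it too and moves its index
      rw [pyALoop_matched _ _ _ _ _ _ _ _ hn habs hgetA hgetB hcmp]
      rw [show -(c : Int) - (d : Int) - 1 - 1 = -((c + 1 : Nat) : Int) - (d : Int) - 1 by
            push_cast; ring,
          show -(c : Int) - 1 - 1 = -((c + 1 : Nat) : Int) - 1 by push_cast; ring,
          show (c : Int) + 1 = ((c + 1 : Nat) : Int) by push_cast; ring]
      rw [ih (c + 1) d (by simp only [List.length_cons] at hlen; omega)
            (by rw [show c + 1 + d = c + d + 1 from by omega]; exact hR')]
      have hinit : ((m : Int) - 1 - ((c + 1 : Nat) : Int), ((c + 1 : Nat) : Int))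
          = bStep sB ((m : Int) - 1 - (c : Int), (c : Int)) x := by
        unfold bStep
        rw [if_pos ⟨by omega, by rw [hgetD]; omega⟩]
        rw [show ((c + 1 : Nat) : Int) = (c : Int) + 1 by push_cast; ring,
            show (m : Int) - 1 - ((c : Int) + 1) = (m : Int) - 1 - (c : Int) - 1 by ring]
      rw [List.foldl_cons, ← hinit]

-- ===== VERDICT (by name: the statement is the Claim_ definition above) =====
theorem solution_spec : Claim_equal_solution := by
  intro A B _ hPre
  unfold Spec_solution
  simp only [solution, solution_alt]
  set sA := PySem.List.sorted A (fun x => x) false with hsA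
  set sB := PySem.List.sorted B (fun x => x) false with hsB
  have hlenA : sA.length = A.length := PySem.List.length_sorted ..
  have hlenB : sB.length = B.length := PySem.List.length_sorted ..
  have hn : 0 < sA.length := by
    rw [hlenA]; exact List.length_pos_iff.mpr hPre.1
  have hm : sA.length ≤ sB.length := by rw [hlenA, hlenB]; exact hPre.2
  have key := pyALoop_eq_fold sA sB hn hm sA.reverse 0 0
    (by simp) (by simp)
  simp only [Nat.cast_zero, neg_zero, zero_sub, List.drop_zero, sub_zero,
    List.length_reverse] at key
  rw [key]
  simp
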